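-- pv_equiv track=rewrite | github.com/Educorreia932/FCUP-BINF | Exercises/Pairwise Sequence Alignment/dotplots.py | extended_dotplot
-- ===== SOURCE A (Python) =====
-- def create_matrix(nrows, ncols):
--     return [[0 for j in range(ncols)] for i in range(nrows)]
--
-- def extended_dotplot(seq1, seq2, window, stringency):
--     mat = create_matrix(len(seq1), len(seq2))
--     start = int(window / 2)
--
--     for i in range(start, len(seq1) - start):
--         for j in range(start, len(seq2) - start):
--             matches = 0
--             l = j - start
--
--             for k in range(i - start, i + start + 1):
--                 if seq1[k] == seq2[l]:
--                     matches += 1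
--
--                 l += 1
--
--                 if matches >= stringency:
--                     mat[i][j] = 1
--
--     return mat
-- ===== SOURCE B (Python) =====
-- def extended_dotplot(seq1, seq2, window, stringency):
--     # Diagonal prefix sums: one pass per diagonal instead of re-scanning the
--     # window for every cell (O(n*m) instead of O(n*m*window)).
--     n, m = len(seq1), len(seq2)
--     mat = [[0] * m for _ in range(n)]
--     start = int(window / 2)
--     if start < 0:
--         return mat  # non-positive window: nothing is compared
--     for d in range(-(m - 1), n):  # diagonal i - j == d
--         lo, hi = max(0, d), min(n, m + d)
--         acc = [0]
--         for t in range(lo, hi):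
--             acc.append(acc[-1] + (seq1[t] == seq2[t - d]))
--         for i in range(max(start, d + start), min(n - start, m + d - start)):
--             if acc[i + start + 1 - lo] - acc[i - start - lo] >= stringency:
--                 mat[i][i - d] = 1
--     return mat
-- ===== Notes on version B (the rewrite author's own statement) =====
-- stated objective: faster
-- what changed: B computes, per diagonal i-j, a single prefix-sum pass over the matching positions and tests each window by one subtraction, instead of A's re-scan of the whole window for every cell.
import Mathlib
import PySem

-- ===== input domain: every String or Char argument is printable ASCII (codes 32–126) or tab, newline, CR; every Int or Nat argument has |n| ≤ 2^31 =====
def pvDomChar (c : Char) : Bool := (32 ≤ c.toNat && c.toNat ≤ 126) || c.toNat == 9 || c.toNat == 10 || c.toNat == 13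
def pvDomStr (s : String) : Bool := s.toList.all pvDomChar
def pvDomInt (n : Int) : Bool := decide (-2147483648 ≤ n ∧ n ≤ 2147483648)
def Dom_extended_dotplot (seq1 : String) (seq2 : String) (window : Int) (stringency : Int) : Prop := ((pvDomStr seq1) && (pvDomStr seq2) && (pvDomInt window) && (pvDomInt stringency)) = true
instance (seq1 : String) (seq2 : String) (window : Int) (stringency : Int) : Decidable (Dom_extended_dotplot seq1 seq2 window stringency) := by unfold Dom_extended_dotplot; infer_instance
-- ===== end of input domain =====

-- B replaces A's per-cell window re-scan by one prefix-sum pass per diagonal (same return value; objective: faster).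


-- ===== PORT A =====
def create_matrix (nrows ncols : Int) : List (List Int) :=
  (PySem.List.pyRange 0 nrows 1).map (fun _ => (PySem.List.pyRange 0 ncols 1).map (fun _ => (0 : Int)))

-- literal port of A; seq indexing is always in range where the loops execute, so '.getD 'A'' never supplies its default
def extended_dotplot (seq1 : String) (seq2 : String) (window : Int) (stringency : Int) : List (List Int) :=
  let mat := create_matrix (PySem.Str.len seq1) (PySem.Str.len seq2)
  let start : Int := window.tdiv 2   -- int(window / 2): truncation toward zero (exact: |window| ≤ 2^31 < 2^53)
  (PySem.List.pyRange start (PySem.Str.len seq1 - start) 1).foldl (fun mat i =>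
    (PySem.List.pyRange start (PySem.Str.len seq2 - start) 1).foldl (fun mat j =>
      ((PySem.List.pyRange (i - start) (i + start + 1) 1).foldl
        (fun (st : Int × Int × List (List Int)) k =>
          let mtc := if (PySem.Str.pyGet? seq1 k).getD 'A' == (PySem.Str.pyGet? seq2 st.2.1).getD 'A'
                         then st.1 + 1 else st.1
          let l := st.2.1 + 1
          let mat := if stringency ≤ mtc
                     then PySem.List.pySetD st.2.2 i (PySem.List.pySetD (PySem.List.pyGetD st.2.2 i []) j 1)
                     else st.2.2
          (mtc, l, mat))
        (0, j - start, mat)).2.2) mat) mat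

-- ===== PORT B =====
-- literal port of Source B (diagonal prefix sums); same indexing remark as for A
def extended_dotplot_alt (seq1 : String) (seq2 : String) (window : Int) (stringency : Int) : List (List Int) :=
  let n : Int := PySem.Str.len seq1
  let m : Int := PySem.Str.len seq2
  let mat := (PySem.List.pyRange 0 n 1).map (fun _ => List.replicate m.toNat (0 : Int))
  let start : Int := window.tdiv 2
  if start < 0 then mat else
  (PySem.List.pyRange (-(m - 1)) n 1).foldl (fun mat d =>
    let lo := max 0 d
    let hi := min n (m + d)
    let acc := (PySem.List.pyRange lo hi 1).foldl (fun acc t =>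
        acc ++ [PySem.List.pyGetD acc (-1) 0 +
                (if (PySem.Str.pyGet? seq1 t).getD 'A' == (PySem.Str.pyGet? seq2 (t - d)).getD 'A'
                 then 1 else 0)]) [(0 : Int)]
    (PySem.List.pyRange (max start (d + start)) (min (n - start) (m + d - start)) 1).foldl (fun mat i =>
      if stringency ≤ PySem.List.pyGetD acc (i + start + 1 - lo) 0 - PySem.List.pyGetD acc (i - start - lo) 0
      then PySem.List.pySetD mat i (PySem.List.pySetD (PySem.List.pyGetD mat i []) (i - d) 1)
      else mat) mat) mat

-- ===== PRECONDITION & SPEC =====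
def Spec_extended_dotplot (seq1 : String) (seq2 : String) (window : Int) (stringency : Int) (out : List (List Int)) : Prop := out = extended_dotplot_alt seq1 seq2 window stringency
instance (seq1 : String) (seq2 : String) (window : Int) (stringency : Int) (out : List (List Int)) : Decidable (Spec_extended_dotplot seq1 seq2 window stringency out) := by unfold Spec_extended_dotplot; infer_instance

-- ===== CLAIM (what is proved, stated in full; the proofs are below) =====
def Claim_equal_extended_dotplot : Prop := ∀ (seq1 : String) (seq2 : String) (window : Int) (stringency : Int), Dom_extended_dotplot seq1 seq2 window stringency → Spec_extended_dotplot seq1 seq2 window stringency (extended_dotplot seq1 seq2 window stringency)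

-- ===== LEMMAS AND PROOFS =====

-- the character comparison made at offset t of diagonal i - j = d
def pvMatch (s1 s2 : String) (d t : Int) : Bool :=
  (PySem.Str.pyGet? s1 t).getD 'A' == (PySem.Str.pyGet? s2 (t - d)).getD 'A'

-- number of matches on diagonal d among offsets t ∈ [a, b)
def pvCnt (s1 s2 : String) (d a b : Int) : Int :=
  ((PySem.List.pyRange a b 1).countP (fun t => pvMatch s1 s2 d t) : Int)

-- mat[i][j] = 1
def pvSet (mat : List (List Int)) (i j : Int) : List (List Int) :=
  PySem.List.pySetD mat i (PySem.List.pySetD (PySem.List.pyGetD mat i []) j 1)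

def pvGet (mat : List (List Int)) (u v : Nat) : Int := (mat.getD u []).getD v 0

def pvRect (M : Nat) (mat : List (List Int)) : Prop := ∀ r ∈ mat, r.length = M

lemma pvCnt_nonneg (s1 s2 : String) (d a b : Int) : 0 ≤ pvCnt s1 s2 d a b := by
  exact Int.natCast_nonneg _

lemma pvCnt_cons (s1 s2 : String) (d a b : Int) (h : a < b) :
    pvCnt s1 s2 d a b = (if pvMatch s1 s2 d a then 1 else 0) + pvCnt s1 s2 d (a+1) b := by
  unfold pvCnt
  rw [PySem.List.pyRange_one_cons h, List.countP_cons]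
  by_cases hm : pvMatch s1 s2 d a <;> simp [hm] <;> push_cast <;> ring

lemma pvCnt_append (s1 s2 : String) (d a b c : Int) (h1 : a ≤ b) (h2 : b ≤ c) :
    pvCnt s1 s2 d a c = pvCnt s1 s2 d a b + pvCnt s1 s2 d b c := by
  unfold pvCnt
  rw [PySem.List.pyRange_one_append a b c h1 h2, List.countP_append]
  push_cast; ring

lemma pvCnt_singleton (s1 s2 : String) (d a : Int) :
    pvCnt s1 s2 d a (a+1) = if pvMatch s1 s2 d a then 1 else 0 := by
  have h : a < a + 1 := by omega
  rw [pvCnt_cons s1 s2 d a (a+1) h]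
  unfold pvCnt
  rw [PySem.List.pyRange_one_eq_nil (by omega)]
  simp

lemma pvSet_length (mat : List (List Int)) (i j : Int) :
    (pvSet mat i j).length = mat.length := by
  simp [pvSet, PySem.List.length_pySetD]

lemma pvSet_rect {M : Nat} {mat : List (List Int)} (h : pvRect M mat)
    (i j : Int) (hi0 : 0 ≤ i) (hiL : i < (mat.length : Int)) (hj0 : 0 ≤ j) (hjM : j < (M : Int)) :
    pvRect M (pvSet mat i j) := by
  intro r hr
  rw [pvSet, PySem.List.pySetD_of_nonneg _ _ hi0] at hr
  rcases List.mem_or_eq_of_mem_set hr with h1 | h1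
  · exact h r h1
  · subst h1
    rw [PySem.List.pySetD_of_nonneg _ _ hj0, List.length_set,
        PySem.List.pyGetD_of_nonneg _ _ hi0]
    have hlt : i.toNat < mat.length := by omega
    rw [List.getD_eq_getElem _ _ hlt]
    exact h _ (List.getElem_mem hlt)

lemma pvGetD_set {A : Type} (l : List A) (n : Nat) (a d : A) (u : Nat) (hu : u < l.length) :
    (l.set n a).getD u d = if n = u then a else l.getD u d := by
  by_cases h : n = u
  · subst h
    rw [List.getD_eq_getElem _ _ (by simpa using hu), List.getElem_set_self (by simpa using hu)]
    simp
  · rw [List.getD_eq_getElem _ _ (by simpa using hu), List.getElem_set_ne h,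
        List.getD_eq_getElem _ _ hu]
    simp [h]

lemma pvGet_pvSet {M : Nat} {mat : List (List Int)} (h : pvRect M mat)
    (i j : Int) (hi0 : 0 ≤ i) (hiL : i < (mat.length : Int)) (hj0 : 0 ≤ j) (hjM : j < (M : Int))
    (u v : Nat) (hu : u < mat.length) (hv : v < M) :
    pvGet (pvSet mat i j) u v = if i = (u : Int) ∧ j = (v : Int) then 1 else pvGet mat u v := by
  have hit : i.toNat < mat.length := by omega
  have hrowlen : (mat.getD i.toNat []).length = M := by
    rw [List.getD_eq_getElem _ _ hit]; exact h _ (List.getElem_mem hit)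
  unfold pvSet pvGet
  rw [PySem.List.pySetD_of_nonneg _ _ hi0, PySem.List.pySetD_of_nonneg _ _ hj0,
      PySem.List.pyGetD_of_nonneg _ _ hi0]
  rw [pvGetD_set _ _ _ _ _ hu]
  by_cases hiu : i.toNat = u
  · rw [if_pos hiu, pvGetD_set _ _ _ _ _ (by omega)]
    by_cases hjv : j.toNat = v
    · rw [if_pos hjv, if_pos (by omega)]
    · rw [if_neg hjv, if_neg (by omega), hiu]
  · rw [if_neg hiu, if_neg (by omega)]

lemma pvSet_idem {M : Nat} {mat : List (List Int)} (h : pvRect M mat)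
    (i j : Int) (hi0 : 0 ≤ i) (hiL : i < (mat.length : Int)) (hj0 : 0 ≤ j) (hjM : j < (M : Int)) :
    pvSet (pvSet mat i j) i j = pvSet mat i j := by
  have hit : i.toNat < mat.length := by omega
  unfold pvSet
  rw [PySem.List.pySetD_of_nonneg _ _ hj0, PySem.List.pySetD_of_nonneg _ _ hi0,
      PySem.List.pyGetD_of_nonneg _ _ hi0]
  rw [PySem.List.pySetD_of_nonneg _ _ hi0, PySem.List.pyGetD_of_nonneg _ _ hi0,
      PySem.List.pySetD_of_nonneg _ _ hj0]
  rw [pvGetD_set mat i.toNat _ _ i.toNat hit, if_pos rfl, List.set_set, List.set_set]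

-- generic cell-setting fold
lemma pvCellsFold {α : Type} (pos : α → Int × Int) (C : α → Bool) (M : Nat) :
  ∀ (ps : List α) (mat : List (List Int)), pvRect M mat →
  (∀ p ∈ ps, 0 ≤ (pos p).1 ∧ (pos p).1 < (mat.length : Int) ∧ 0 ≤ (pos p).2 ∧ (pos p).2 < (M : Int)) →
  (ps.foldl (fun mat p => if C p then pvSet mat (pos p).1 (pos p).2 else mat) mat).length = mat.length ∧
  pvRect M (ps.foldl (fun mat p => if C p then pvSet mat (pos p).1 (pos p).2 else mat) mat) ∧
  ∀ u v, u < mat.length → v < M →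
    pvGet (ps.foldl (fun mat p => if C p then pvSet mat (pos p).1 (pos p).2 else mat) mat) u v =
      if ps.any (fun p => C p && ((pos p).1 == (u : Int)) && ((pos p).2 == (v : Int))) then 1 else pvGet mat u v := by
  intro ps
  induction ps with
  | nil => intro mat hR _; exact ⟨rfl, hR, fun u v _ _ => by simp⟩
  | cons p ps ih =>
    intro mat hR hB
    obtain ⟨hp1, hp2, hp3, hp4⟩ := hB p (by simp)
    have hmat1R : pvRect M (if C p then pvSet mat (pos p).1 (pos p).2 else mat) := by
      split
      · exact pvSet_rect hR _ _ hp1 hp2 hp3 hp4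
      · exact hR
    have hmat1L : (if C p then pvSet mat (pos p).1 (pos p).2 else mat).length = mat.length := by
      split
      · exact pvSet_length mat _ _
      · rfl
    have hB' : ∀ q ∈ ps, 0 ≤ (pos q).1 ∧ (pos q).1 < (((if C p then pvSet mat (pos p).1 (pos p).2 else mat)).length : Int) ∧ 0 ≤ (pos q).2 ∧ (pos q).2 < (M : Int) := by
      intro q hq
      obtain ⟨a, b, c, d⟩ := hB q (by simp [hq])
      exact ⟨a, by rw [hmat1L]; exact b, c, d⟩
    obtain ⟨ihL, ihR, ihG⟩ := ih _ hmat1R hB'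
    refine ⟨by rw [List.foldl_cons, ihL, hmat1L], by rw [List.foldl_cons]; exact ihR, ?_⟩
    intro u v hu hv
    rw [List.foldl_cons, ihG u v (by rw [hmat1L]; exact hu) hv]
    have hGet1 : pvGet (if C p then pvSet mat (pos p).1 (pos p).2 else mat) u v =
        if C p && ((pos p).1 == (u : Int)) && ((pos p).2 == (v : Int)) then 1 else pvGet mat u v := by
      by_cases hC : C p
      · simp only [hC, if_true, Bool.true_and]
        rw [pvGet_pvSet hR _ _ hp1 hp2 hp3 hp4 u v hu hv]
        by_cases h1 : (pos p).1 = (u : Int) <;> by_cases h2 : (pos p).2 = (v : Int) <;>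
          simp [h1, h2]
      · simp [hC]
    rw [hGet1, List.any_cons]
    by_cases hhit : (C p && ((pos p).1 == (u : Int)) && ((pos p).2 == (v : Int))) = true <;>
      by_cases htail : (ps.any fun p => C p && ((pos p).1 == (u : Int)) && ((pos p).2 == (v : Int))) = true <;>
      simp [hhit, htail]

-- a foldl congruence that carries an invariant through the loop
lemma pvFoldlInvCongr {α β : Type} (P : β → Prop) :
  ∀ (l : List α) (f g : β → α → β),
  (∀ acc x, x ∈ l → P acc → f acc x = g acc x ∧ P (g acc x)) →
  ∀ init, P init → l.foldl f init = l.foldl g init ∧ P (l.foldl g init) := by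
  intro l
  induction l with
  | nil => intro f g h init hP; exact ⟨rfl, hP⟩
  | cons x xs ih =>
    intro f g h init hP
    obtain ⟨he, hPg⟩ := h init x (by simp) hP
    have := ih f g (fun acc y hy hacc => h acc y (by simp [hy]) hacc) (g init x) hPg
    simpa [List.foldl_cons, he] using this

-- A's inner-loop body, named for the proofs (definitionally the lambda in the port)
def pvStepA (s1 s2 : String) (stringency i j : Int) (st : Int × Int × List (List Int)) (k : Int) :
    Int × Int × List (List Int) :=
  let mtc := if (PySem.Str.pyGet? s1 k).getD 'A' == (PySem.Str.pyGet? s2 st.2.1).getD 'A'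
             then st.1 + 1 else st.1
  let l := st.2.1 + 1
  let mat := if stringency ≤ mtc
             then PySem.List.pySetD st.2.2 i (PySem.List.pySetD (PySem.List.pyGetD st.2.2 i []) j 1)
             else st.2.2
  (mtc, l, mat)

-- A's innermost (k) loop: it counts the window matches and marks cell (i, j)
-- exactly when the running count ever reaches the stringency, i.e. when the
-- full count does and the window is nonempty.
lemma pvInnerA (s1 s2 : String) (stringency start i j : Int) (M : Nat)
    (hi0 : 0 ≤ i) (hj0 : 0 ≤ j) (hjM : j < (M : Int)) :
    ∀ (c : Nat) (a c0 : Int) (mat : List (List Int)), pvRect M mat → i < (mat.length : Int) →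
    ((PySem.List.pyRange a (a + c) 1).foldl (pvStepA s1 s2 stringency i j)
      (c0, a - (i - j), mat))
    = (c0 + pvCnt s1 s2 (i - j) a (a + c), (a + c) - (i - j),
       if 0 < c ∧ stringency ≤ c0 + pvCnt s1 s2 (i - j) a (a + c) then pvSet mat i j else mat) := by
  intro c
  induction c with
  | zero =>
    intro a c0 mat hR hiL
    have h0 : pvCnt s1 s2 (i - j) a (a + (0:Nat)) = 0 := by
      unfold pvCnt; rw [PySem.List.pyRange_one_eq_nil (by omega)]; simp
    rw [PySem.List.pyRange_one_eq_nil (by omega), List.foldl_nil, h0]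
    simp
  | succ c ih =>
    intro a c0 mat hR hiL
    have hend : a + ((c : Nat) + 1 : Nat) = (a + 1) + (c : Nat) := by push_cast; ring
    have hcons : PySem.List.pyRange a (a + ((c : Nat) + 1 : Nat)) 1
        = a :: PySem.List.pyRange (a + 1) ((a + 1) + (c : Nat)) 1 := by
      rw [PySem.List.pyRange_one_cons (by push_cast; omega), hend]
    rw [hcons, List.foldl_cons]
    have hδdef : (if (PySem.Str.pyGet? s1 a).getD 'A' == (PySem.Str.pyGet? s2 (a - (i - j))).getD 'A'
                  then c0 + 1 else c0) = c0 + (if pvMatch s1 s2 (i - j) a then 1 else 0) := by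
      unfold pvMatch; split <;> omega
    set δ : Int := if pvMatch s1 s2 (i - j) a then 1 else 0 with hδ
    have hδ0 : 0 ≤ δ := by rw [hδ]; split <;> omega
    set mat1 : List (List Int) := if stringency ≤ c0 + δ then pvSet mat i j else mat with hmat1
    have hR1 : pvRect M mat1 := by
      rw [hmat1]; split
      · exact pvSet_rect hR _ _ hi0 hiL hj0 hjM
      · exact hR
    have hL1 : (mat1.length : Int) = (mat.length : Int) := by
      rw [hmat1]; split
      · rw [pvSet_length]
      · rfl
    have hstep : pvStepA s1 s2 stringency i j (c0, a - (i - j), mat) a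
        = (c0 + δ, (a + 1) - (i - j), mat1) := by
      simp only [pvStepA, hmat1]
      refine congrArg₂ _ hδdef (congrArg₂ _ (by ring) ?_)
      rw [hδdef]
      rfl
    rw [hstep, ih (a + 1) (c0 + δ) mat1 hR1 (by omega)]
    have hcntsplit : pvCnt s1 s2 (i - j) a (a + ((c : Nat) + 1 : Nat)) = δ + pvCnt s1 s2 (i - j) (a + 1) ((a + 1) + (c : Nat)) := by
      rw [hend, pvCnt_cons s1 s2 (i - j) a _ (by push_cast; omega)]
    have hcnt0 : 0 ≤ pvCnt s1 s2 (i - j) (a + 1) ((a + 1) + (c : Nat)) := pvCnt_nonneg _ _ _ _ _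
    refine congrArg₂ _ (by rw [hcntsplit]; ring) (congrArg₂ _ (by rw [hend]) ?_)
    -- the matrix component
    rw [hmat1]
    by_cases h1 : stringency ≤ c0 + δ
    · rw [if_pos h1]
      have htot : stringency ≤ c0 + pvCnt s1 s2 (i - j) a (a + ((c : Nat) + 1 : Nat)) := by
        rw [hcntsplit]; omega
      conv_rhs => rw [if_pos (show 0 < c + 1 ∧ stringency ≤ c0 + pvCnt s1 s2 (i - j) a (a + ((c : Nat) + 1 : Nat)) from ⟨by omega, htot⟩)]
      split
      · exact pvSet_idem hR _ _ hi0 hiL hj0 hjM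
      · rfl
    · rw [if_neg h1]
      by_cases h2 : 0 < c ∧ stringency ≤ c0 + δ + pvCnt s1 s2 (i - j) (a + 1) ((a + 1) + (c : Nat))
      · rw [if_pos h2, if_pos ⟨by omega, by rw [hcntsplit]; omega⟩]
      · rw [if_neg h2, if_neg ?_]
        rintro ⟨-, hc2⟩
        rw [hcntsplit] at hc2
        -- if c = 0 the tail count is 0, contradicting h1
        rcases Nat.eq_zero_or_pos c with hc | hc
        · subst hc
          have : pvCnt s1 s2 (i - j) (a + 1) ((a + 1) + ((0 : Nat) : Int)) = 0 := by
            unfold pvCnt; rw [PySem.List.pyRange_one_eq_nil (by omega)]; simp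
          simp only [Nat.cast_zero] at this hc2 ⊢
          omega
        · exact h2 ⟨hc, by omega⟩

-- B's prefix-sum list for one diagonal
def pvStepAcc (s1 s2 : String) (d : Int) (acc : List Int) (t : Int) : List Int :=
  acc ++ [PySem.List.pyGetD acc (-1) 0 +
          (if (PySem.Str.pyGet? s1 t).getD 'A' == (PySem.Str.pyGet? s2 (t - d)).getD 'A'
           then 1 else 0)]

lemma pvAccSpec (s1 s2 : String) (d lo : Int) :
    ∀ (c : Nat), (PySem.List.pyRange lo (lo + c) 1).foldl (pvStepAcc s1 s2 d) [(0 : Int)]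
      = (List.range (c + 1)).map (fun u : Nat => pvCnt s1 s2 d lo (lo + (u : Int))) := by
  intro c
  induction c with
  | zero =>
    rw [PySem.List.pyRange_one_eq_nil (by omega), List.foldl_nil]
    have h0 : pvCnt s1 s2 d lo (lo + ((0 : Nat) : Int)) = 0 := by
      unfold pvCnt; rw [PySem.List.pyRange_one_eq_nil (by omega)]; simp
    rw [List.range_one, List.map_cons, List.map_nil, h0]
  | succ c ih =>
    have hend : lo + ((c : Nat) + 1 : Nat) = (lo + (c : Nat)) + 1 := by push_cast; ring
    rw [hend, PySem.List.pyRange_one_succ_right (by omega), List.foldl_append,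
        ih, List.foldl_cons, List.foldl_nil]
    have hsplit : (List.range (c + 1)).map (fun u : Nat => pvCnt s1 s2 d lo (lo + (u : Int)))
        = (List.range c).map (fun u : Nat => pvCnt s1 s2 d lo (lo + (u : Int))) ++ [pvCnt s1 s2 d lo (lo + (c : Nat))] := by
      rw [List.range_succ, List.map_append]; rfl
    unfold pvStepAcc
    rw [hsplit, List.append_assoc, PySem.List.pyGetD_neg_one_append_singleton]
    have hnew : pvCnt s1 s2 d lo (lo + (c : Nat)) +
        (if (PySem.Str.pyGet? s1 (lo + (c : Nat))).getD 'A' == (PySem.Str.pyGet? s2 (lo + (c : Nat) - d)).getD 'A' then 1 else 0)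
        = pvCnt s1 s2 d lo (lo + ((c : Nat) + 1 : Nat)) := by
      rw [hend, pvCnt_append s1 s2 d lo (lo + (c : Nat)) (lo + (c : Nat) + 1) (by omega) (by omega),
          pvCnt_singleton]
      rfl
    rw [hnew]
    rw [show (List.range (c + 1 + 1)).map (fun u : Nat => pvCnt s1 s2 d lo (lo + (u : Int)))
        = (List.range (c + 1)).map (fun u : Nat => pvCnt s1 s2 d lo (lo + (u : Int))) ++ [pvCnt s1 s2 d lo (lo + ((c : Nat) + 1 : Nat))] by
      rw [List.range_succ, List.map_append]; rfl]
    rw [hsplit, List.append_assoc]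

lemma pvAccVal (s1 s2 : String) (d lo hi x : Int) (hx0 : 0 ≤ x) (hxc : x ≤ hi - lo) :
    PySem.List.pyGetD ((PySem.List.pyRange lo hi 1).foldl (pvStepAcc s1 s2 d) [(0 : Int)]) x 0
      = pvCnt s1 s2 d lo (lo + x) := by
  have hc : hi = lo + ((hi - lo).toNat : Int) := by omega
  have hs := pvAccSpec s1 s2 d lo (hi - lo).toNat
  rw [← hc] at hs
  rw [hs, PySem.List.pyGetD_of_nonneg _ _ hx0]
  have hxlt : x.toNat < (hi - lo).toNat + 1 := by omega
  rw [List.getD_eq_getElem _ _ (by simpa using hxlt), List.getElem_map, List.getElem_range]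
  congr 1
  omega

-- the initial all-zero matrix, in both ports' shapes
lemma pvMat0_eq (n m : Int) :
    create_matrix n m = (PySem.List.pyRange 0 n 1).map (fun _ => List.replicate m.toNat (0 : Int)) := by
  unfold create_matrix
  have h : (PySem.List.pyRange 0 m 1).map (fun _ => (0 : Int)) = List.replicate m.toNat 0 := by
    rw [List.map_const', PySem.List.length_pyRange_one]
    norm_num
  rw [h]

lemma pvGet_mat0 (n m : Int) (u v : Nat) (hu : u < ((PySem.List.pyRange 0 n 1).map (fun _ => List.replicate m.toNat (0 : Int))).length) :
    pvGet ((PySem.List.pyRange 0 n 1).map (fun _ => List.replicate m.toNat (0 : Int))) u v = 0 := by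
  unfold pvGet
  rw [List.getD_eq_getElem _ _ hu, List.getElem_map]
  rcases Nat.lt_or_ge v m.toNat with h | h
  · rw [List.getD_eq_getElem _ _ (by simpa using h), List.getElem_replicate]
  · rw [List.getD_eq_default]
    simpa using h

lemma pvIteCongrBool (b1 b2 : Bool) (h : b1 = true ↔ b2 = true) :
    (if b1 then (1 : Int) else 0) = if b2 then 1 else 0 := by
  cases b1 <;> cases b2 <;> simp_all

lemma pvGet_elem (mat : List (List Int)) (u v : Nat) (h1 : u < mat.length) (hv : v < mat[u].length) :
    mat[u][v] = pvGet mat u v := by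
  unfold pvGet
  rw [List.getD_eq_getElem _ _ h1, List.getD_eq_getElem _ _ hv]

lemma pvFoldlConst {α β : Type} (l : List α) (f : β → α → β)
    (h : ∀ acc x, x ∈ l → f acc x = acc) : ∀ init, l.foldl f init = init := by
  induction l with
  | nil => intro init; rfl
  | cons x xs ih =>
    intro init
    rw [List.foldl_cons, h init x (by simp)]
    exact ih (fun acc y hy => h acc y (by simp [hy])) init

lemma pvMain (s1 s2 : String) (w str : Int) :
    extended_dotplot s1 s2 w str = extended_dotplot_alt s1 s2 w str := by
  simp only [extended_dotplot, extended_dotplot_alt, pvMat0_eq]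
  set n := PySem.Str.len s1 with hn
  set m := PySem.Str.len s2 with hm
  set start := w.tdiv 2 with hstart
  have hn0 : 0 ≤ n := by rw [hn, PySem.Str.len_eq]; exact Int.natCast_nonneg _
  have hm0 : 0 ≤ m := by rw [hm, PySem.Str.len_eq]; exact Int.natCast_nonneg _
  by_cases hneg : start < 0
  · rw [if_pos hneg]
    apply pvFoldlConst
    intro acc i hi
    apply pvFoldlConst
    intro acc2 j hj
    rw [PySem.List.pyRange_one_eq_nil (by omega), List.foldl_nil]
  · push_neg at hneg
    rw [if_neg (by omega)]
    set M := m.toNat with hM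
    have hMm : (M : Int) = m := Int.toNat_of_nonneg hm0
    set mat0 := List.map (fun _ : Int => List.replicate M (0 : Int)) (PySem.List.pyRange 0 n 1) with hmat0
    have hlen0 : (mat0.length : Int) = n := by
      rw [hmat0, List.length_map, PySem.List.length_pyRange_one]; omega
    have hrect0 : pvRect M mat0 := by
      rw [hmat0]; intro r hr
      rcases List.mem_map.1 hr with ⟨x, -, hx⟩
      rw [← hx, List.length_replicate]
    have hc2s : ((2 * start + 1).toNat : Int) = 2 * start + 1 := Int.toNat_of_nonneg (by omega)
    -- Step 1: A's loops compute, per cell (i, j), a test of the window count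
    trans (List.foldl (fun mat i =>
        List.foldl (fun mat j =>
          if decide (str ≤ pvCnt s1 s2 (i - j) (i - start) (i + start + 1)) = true
          then pvSet mat i j else mat) mat
          (PySem.List.pyRange start (m - start) 1)) mat0 (PySem.List.pyRange start (n - start) 1))
    · refine (pvFoldlInvCongr (fun mat => mat.length = mat0.length ∧ pvRect M mat) _ _ _ ?_ mat0 ⟨rfl, hrect0⟩).1
      intro acc i hi hPacc
      rw [PySem.List.mem_pyRange_one] at hi
      have hper : ∀ acc2 j, j ∈ PySem.List.pyRange start (m - start) 1 →
          (acc2.length = mat0.length ∧ pvRect M acc2) →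
          ((List.foldl (pvStepA s1 s2 str i j) ((0 : Int), j - start, acc2)
              (PySem.List.pyRange (i - start) (i + start + 1) 1)).2.2
            = (if decide (str ≤ pvCnt s1 s2 (i - j) (i - start) (i + start + 1)) = true
               then pvSet acc2 i j else acc2)) ∧
          ((if decide (str ≤ pvCnt s1 s2 (i - j) (i - start) (i + start + 1)) = true
            then pvSet acc2 i j else acc2).length = mat0.length ∧
           pvRect M (if decide (str ≤ pvCnt s1 s2 (i - j) (i - start) (i + start + 1)) = true
            then pvSet acc2 i j else acc2)) := by
        intro acc2 j hj hP2
        rw [PySem.List.mem_pyRange_one] at hj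
        have hlen2 : (acc2.length : Int) = n := by rw [hP2.1, hlen0]
        have hiL : i < (acc2.length : Int) := by omega
        constructor
        · have hrw1 : i + start + 1 = (i - start) + ((2 * start + 1).toNat : Int) := by omega
          have hrw2 : j - start = (i - start) - (i - j) := by ring
          rw [hrw2, hrw1, pvInnerA s1 s2 str start i j M (by omega) (by omega) (by omega)
                ((2 * start + 1).toNat) (i - start) 0 acc2 hP2.2 hiL]
          dsimp only
          simp only [zero_add, decide_eq_true_eq]
          exact if_congr ⟨And.right, fun h => ⟨by omega, h⟩⟩ rfl rfl
        · split
          · exact ⟨by rw [pvSet_length, hP2.1], pvSet_rect hP2.2 i j (by omega) hiL (by omega) (by omega)⟩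
          · exact hP2
      exact ⟨(pvFoldlInvCongr (fun mat => mat.length = mat0.length ∧ pvRect M mat) _ _ _ hper acc hPacc).1,
             (pvFoldlInvCongr (fun mat => mat.length = mat0.length ∧ pvRect M mat) _ _ _ hper acc hPacc).2⟩
    -- Step 2: flatten A's side to a single fold over cells
    trans (((PySem.List.pyRange start (n - start) 1).flatMap (fun i =>
          (PySem.List.pyRange start (m - start) 1).map (fun j => (i, j)))).foldl
        (fun mat p => if (fun p : Int × Int => decide (str ≤ pvCnt s1 s2 (p.1 - p.2) (p.1 - start) (p.1 + start + 1))) p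
          then pvSet mat ((fun p : Int × Int => p) p).1 ((fun p : Int × Int => p) p).2 else mat) mat0)
    · rw [List.foldl_flatMap]
      simp only [List.foldl_map]
    -- Step 3: same for B, backwards
    trans (((PySem.List.pyRange (-(m - 1)) n 1).flatMap (fun d =>
          (PySem.List.pyRange (max start (d + start)) (min (n - start) (m + d - start)) 1).map (fun i => (d, i)))).foldl
        (fun mat p => if (fun p : Int × Int => decide (str ≤ pvCnt s1 s2 p.1 (p.2 - start) (p.2 + start + 1))) p
          then pvSet mat ((fun p : Int × Int => (p.2, p.2 - p.1)) p).1 ((fun p : Int × Int => (p.2, p.2 - p.1)) p).2 else mat) mat0)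
    · -- the two cell folds mark exactly the same cells
      have hboundsA : ∀ p ∈ (PySem.List.pyRange start (n - start) 1).flatMap (fun i =>
            (PySem.List.pyRange start (m - start) 1).map (fun j => (i, j))),
          0 ≤ ((fun p : Int × Int => p) p).1 ∧ ((fun p : Int × Int => p) p).1 < (mat0.length : Int) ∧
          0 ≤ ((fun p : Int × Int => p) p).2 ∧ ((fun p : Int × Int => p) p).2 < (M : Int) := by
        intro p hp
        rcases List.mem_flatMap.1 hp with ⟨i, hi, hp2⟩
        rcases List.mem_map.1 hp2 with ⟨j, hj, rfl⟩
        rw [PySem.List.mem_pyRange_one] at hi hj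
        dsimp only
        exact ⟨by omega, by omega, by omega, by omega⟩
      have hboundsB : ∀ p ∈ (PySem.List.pyRange (-(m - 1)) n 1).flatMap (fun d =>
            (PySem.List.pyRange (max start (d + start)) (min (n - start) (m + d - start)) 1).map (fun i => (d, i))),
          0 ≤ ((fun p : Int × Int => (p.2, p.2 - p.1)) p).1 ∧ ((fun p : Int × Int => (p.2, p.2 - p.1)) p).1 < (mat0.length : Int) ∧
          0 ≤ ((fun p : Int × Int => (p.2, p.2 - p.1)) p).2 ∧ ((fun p : Int × Int => (p.2, p.2 - p.1)) p).2 < (M : Int) := by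
        intro p hp
        rcases List.mem_flatMap.1 hp with ⟨d, hd, hp2⟩
        rcases List.mem_map.1 hp2 with ⟨i, hi, rfl⟩
        rw [PySem.List.mem_pyRange_one] at hd hi
        dsimp only
        exact ⟨by omega, by omega, by omega, by omega⟩
      obtain ⟨hLA, hRA, hGA⟩ := pvCellsFold (fun p : Int × Int => p)
        (fun p : Int × Int => decide (str ≤ pvCnt s1 s2 (p.1 - p.2) (p.1 - start) (p.1 + start + 1))) M
        ((PySem.List.pyRange start (n - start) 1).flatMap (fun i =>
          (PySem.List.pyRange start (m - start) 1).map (fun j => (i, j)))) mat0 hrect0 hboundsA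
      obtain ⟨hLB, hRB, hGB⟩ := pvCellsFold (fun p : Int × Int => (p.2, p.2 - p.1))
        (fun p : Int × Int => decide (str ≤ pvCnt s1 s2 p.1 (p.2 - start) (p.2 + start + 1))) M
        ((PySem.List.pyRange (-(m - 1)) n 1).flatMap (fun d =>
          (PySem.List.pyRange (max start (d + start)) (min (n - start) (m + d - start)) 1).map (fun i => (d, i)))) mat0 hrect0 hboundsB
      apply List.ext_getElem (by rw [hLA, hLB])
      intro u h1 h2
      have hu0 : u < mat0.length := by rw [← hLA]; exact h1
      have hrowA := hRA _ (List.getElem_mem h1)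
      have hrowB := hRB _ (List.getElem_mem h2)
      apply List.ext_getElem (by rw [hrowA, hrowB])
      intro v hv1 hv2
      have hvM : v < M := by rw [← hrowA]; exact hv1
      have hg0 : pvGet mat0 u v = 0 := by
        rw [hmat0]
        exact pvGet_mat0 n m u v (by rw [hmat0] at hu0; exact hu0)
      rw [pvGet_elem _ u v h1 hv1, pvGet_elem _ u v h2 hv2, hGA u v hu0 hvM, hGB u v hu0 hvM, hg0]
      apply pvIteCongrBool
      simp only [List.any_eq_true, List.mem_flatMap, List.mem_map, PySem.List.mem_pyRange_one,
        Bool.and_eq_true, beq_iff_eq, decide_eq_true_eq]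
      constructor
      · rintro ⟨x, ⟨i, hi, j, hj, rfl⟩, ⟨hcnt, h1'⟩, h2'⟩
        dsimp only at hcnt h1' h2'
        subst h1'
        subst h2'
        refine ⟨((u : Int) - (v : Int), (u : Int)),
          ⟨(u : Int) - (v : Int), ⟨by omega, by omega⟩, (u : Int), ⟨by omega, by omega⟩, rfl⟩,
          ⟨hcnt, rfl⟩, by omega⟩
      · rintro ⟨x, ⟨d, hd, i, hi', rfl⟩, ⟨hcnt, h1'⟩, h2'⟩
        dsimp only at hcnt h1' h2'
        subst h1'
        refine ⟨((u : Int), (v : Int)),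
          ⟨(u : Int), ⟨by omega, by omega⟩, (v : Int), ⟨by omega, by omega⟩, rfl⟩, ⟨?_, rfl⟩, rfl⟩
        rw [show (u : Int) - (v : Int) = d from by omega]
        exact hcnt
    · -- unflatten B
      symm
      trans (List.foldl (fun mat d =>
          List.foldl (fun mat i =>
            if decide (str ≤ pvCnt s1 s2 d (i - start) (i + start + 1)) = true
            then pvSet mat i (i - d) else mat) mat
            (PySem.List.pyRange (max start (d + start)) (min (n - start) (m + d - start)) 1))
          mat0 (PySem.List.pyRange (-(m - 1)) n 1))
      · apply PySem.List.foldl_congr_mem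
        intro acc d hd
        apply PySem.List.foldl_congr_mem
        intro acc2 i hi2
        rw [PySem.List.mem_pyRange_one] at hd hi2
        have h1 := pvAccVal s1 s2 d (max 0 d) (min n (m + d)) (i + start + 1 - max 0 d) (by omega) (by omega)
        rw [show max 0 d + (i + start + 1 - max 0 d) = i + start + 1 from by ring] at h1
        have h2 := pvAccVal s1 s2 d (max 0 d) (min n (m + d)) (i - start - max 0 d) (by omega) (by omega)
        rw [show max 0 d + (i - start - max 0 d) = i - start from by ring] at h2
        show (if str ≤ PySem.List.pyGetD (List.foldl (pvStepAcc s1 s2 d) [(0 : Int)]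
                (PySem.List.pyRange (max 0 d) (min n (m + d)) 1)) (i + start + 1 - max 0 d) 0 -
              PySem.List.pyGetD (List.foldl (pvStepAcc s1 s2 d) [(0 : Int)]
                (PySem.List.pyRange (max 0 d) (min n (m + d)) 1)) (i - start - max 0 d) 0
              then PySem.List.pySetD acc2 i (PySem.List.pySetD (PySem.List.pyGetD acc2 i []) (i - d) 1) else acc2) = _
        rw [h1, h2, pvCnt_append s1 s2 d (max 0 d) (i - start) (i + start + 1) (by omega) (by omega)]
        simp only [decide_eq_true_eq]
        exact if_congr (by omega) rfl rfl
      · rw [List.foldl_flatMap]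
        simp only [List.foldl_map]

theorem extended_dotplot_spec : Claim_equal_extended_dotplot := by
  intro seq1 seq2 window stringency _
  unfold Spec_extended_dotplot
  exact pvMain seq1 seq2 window stringency
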